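-- pv_equiv track=rewrite | github.com/bernik86/sum-of-minterms | sum_of_min_terms.py | parse_outer_paranthesis
-- ===== SOURCE A (Python) =====
-- def parse_outer_paranthesis(expr: str) -> (int, int):
--     '''
--         Determines positions of the outermost opening and closing paranthesis.
--
--         expr: string that is parsed.
--
--         Returns tuple of integers representing the positions of the opening
--         and closing paranthesis.
--     '''
--
--     i_open = -1
--     i_close = -1
--     count = 0
--     for i, sym in enumerate(expr):
--         if sym == "(":
--             if count == 0:
--                 i_open = i
--             count += 1
--         if sym == ")":
--             count -= 1
--             if count == 0:
--                 i_close = i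
--                 break
--             if i_open == -1:
--                 raise ValueError("Invalid Paranthesis")
--
--     return i_open, i_close
-- ===== SOURCE B (Python) =====
-- def parse_outer_paranthesis(expr: str) -> (int, int):
--     """Balance-by-recount: the matching close of the first '(' is the first ')'
--     after it at which the enclosed slice contains equally many '(' and ')'."""
--     i_open = expr.find("(")
--     if i_open == -1:
--         return -1, -1
--     tail = expr[i_open:]
--     j = tail.find(")")
--     while j != -1:
--         if tail.count("(", 0, j) == tail.count(")", 0, j + 1):
--             return i_open, i_open + j
--         j = tail.find(")", j + 1)
--     return i_open, -1
-- ===== Notes on version B (the rewrite author's own statement) =====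
-- stated objective: faster
-- what changed: Replaces A's single fused per-character scan that maintains a running depth counter in Python-level state by a balance-by-recount search: locate the first '(' with str.find, then iterate only over ')' positions (str.find with a start offset) and decide each candidate by recomputing '('/')' substring counts with str.count; B is total and returns a value on the stray-')'-before-'(' inputs where A raises ValueError (excluded by Pre_).
-- outside the precondition, e.g. on parse_outer_paranthesis(')'): A raises ValueError, B returns (-1, -1)
import Mathlib
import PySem

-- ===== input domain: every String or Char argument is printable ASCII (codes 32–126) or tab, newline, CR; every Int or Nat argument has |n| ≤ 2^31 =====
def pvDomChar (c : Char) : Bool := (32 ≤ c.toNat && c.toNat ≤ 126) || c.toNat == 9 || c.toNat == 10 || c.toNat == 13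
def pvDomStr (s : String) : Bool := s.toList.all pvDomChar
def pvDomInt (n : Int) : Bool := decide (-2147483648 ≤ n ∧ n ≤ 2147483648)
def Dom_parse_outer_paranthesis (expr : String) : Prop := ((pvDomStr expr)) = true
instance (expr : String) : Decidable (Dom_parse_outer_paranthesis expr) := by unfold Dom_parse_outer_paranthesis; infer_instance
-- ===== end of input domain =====

-- B: balance-by-recount — first '(' via str.find, then only ')' candidates are visited and each is
-- decided by recomputing substring counts (no running depth state); B is total where A raises.

-- ===== PORT A =====
-- A's for-loop with break/raise, transliterated as structural recursion on the char list;
-- state (i, i_open, i_close, count) exactly as in the Python.  The 'raise ValueError'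
-- branch returns (-2, -2) as a marker: Pre_ excludes exactly those inputs.
def pvA_loop : List Char → Int → Int → Int → Int → Int × Int
  | [], _, io, ic, _ => (io, ic)
  | c :: rest, i, io, ic, count =>
    let io' := if c = '(' then (if count = 0 then i else io) else io
    let count' := if c = '(' then count + 1 else count
    if c = ')' then
      let count'' := count' - 1
      if count'' = 0 then (io', i)
      else if io' = -1 then (-2, -2)  -- raise ValueError("Invalid Paranthesis")
      else pvA_loop rest (i + 1) io' ic count''
    else pvA_loop rest (i + 1) io' ic count'

def parse_outer_paranthesis (expr : String) : Int × Int :=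
  pvA_loop expr.toList 0 (-1) (-1) 0

-- ===== PORT B =====
-- Source B's while loop: j = tail.find(')'), … , j = tail.find(')', j+1).  'find(')', p)' is itself a
-- left-to-right scan from p, so the loop is transcribed as one recursion over tail.drop p that
-- skips non-')' characters and, at each ')', tests Source B's count condition:
-- tail.count('(', 0, j) = count of '(' in tail[:j] (exact for a 1-char needle), likewise for ')'.
def pvB_find (i_open : Int) (tail : List Char) : List Char → Nat → Int × Int
  | [], _ => (i_open, -1)
  | c :: r, p =>
    if c = ')' then
      if (tail.take p).count '(' = (tail.take (p + 1)).count ')' then (i_open, i_open + p)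
      else pvB_find i_open tail r (p + 1)
    else pvB_find i_open tail r (p + 1)

def parse_outer_paranthesis_alt (expr : String) : Int × Int :=
  let i_open := PySem.Str.find expr "("
  if i_open = -1 then (-1, -1)
  else
    -- tail = expr[i_open:]  (i_open ≥ 0 here, so the slice is a drop)
    let tail := expr.toList.drop i_open.toNat
    pvB_find i_open tail tail 0

-- ===== PRECONDITION & SPEC =====
-- Pre_ excludes exactly the inputs on which A raises ValueError: those where the first ')' comes
-- before the first '(' (or where a ')' occurs with no '(' at all).
def pvPreB (expr : String) : Bool :=
  match expr.toList.findIdx? (· == ')') with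
  | none => true
  | some j =>
    match expr.toList.findIdx? (· == '(') with
    | none => false
    | some k => decide (k < j)
def Pre_parse_outer_paranthesis (expr : String) : Prop := pvPreB expr = true
instance (expr : String) : Decidable (Pre_parse_outer_paranthesis expr) := by
  unfold Pre_parse_outer_paranthesis; infer_instance
def pvWitness_parse_outer_paranthesis : String := "(a)"

def Spec_parse_outer_paranthesis (expr : String) (out : Int × Int) : Prop := out = parse_outer_paranthesis_alt expr
instance (expr : String) (out : Int × Int) : Decidable (Spec_parse_outer_paranthesis expr out) := by unfold Spec_parse_outer_paranthesis; infer_instance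

-- ===== CLAIM (what is proved, stated in full; the proofs are below) =====
def Claim_equal_parse_outer_paranthesis : Prop := ∀ (expr : String), Dom_parse_outer_paranthesis expr → Pre_parse_outer_paranthesis expr → Spec_parse_outer_paranthesis expr (parse_outer_paranthesis expr)

-- ===== LEMMAS AND PROOFS =====

-- Past the first '(', A's depth counter at position p (relative to tail) equals
-- (count '(' in tail[:p]) - (count ')' in tail[:p]); hence A's stop test 'count hits 0 at a ")"'
-- is B's recount condition, pointwise.  Proved as: A's post-open loop = B's candidate search.
theorem pvPost (tail : List Char) :
    ∀ (r : List Char) (p : Nat), r = tail.drop p →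
    ∀ (cnt io : Int),
      cnt = ((tail.take p).count '(' : Int) - ((tail.take p).count ')' : Int) →
      1 ≤ cnt → io ≠ -1 →
      pvA_loop r (io + p) io (-1) cnt = pvB_find io tail r p := by
  intro r
  induction r with
  | nil => intro p _ cnt io _ _ _; rfl
  | cons c rest ih =>
    intro p hr cnt io hcnt hc hio
    have hrest : rest = tail.drop (p + 1) := by
      have := congrArg (List.drop 1) hr
      simpa [List.drop_drop, Nat.add_comm] using this
    have hget : tail[p]? = some c := by
      have h0 := congrArg (·[0]?) hr
      simpa [List.getElem?_drop] using h0.symm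
    have hplt : p < tail.length := by
      by_contra hge
      rw [List.getElem?_eq_none (by omega)] at hget; simp at hget
    have htake : tail.take (p + 1) = tail.take p ++ [c] := by
      rw [List.take_add_one, hget]; rfl
    by_cases hop : c = '('
    · -- '(' : A increments count (io unchanged since count ≥ 1 ≠ 0); B skips (not ')')
      subst hop
      have hA : pvA_loop ('(' :: rest) (io + p) io (-1) cnt
          = pvA_loop rest (io + p + 1) io (-1) (cnt + 1) := by
        simp [pvA_loop, show cnt ≠ 0 by omega]
      have hB : pvB_find io tail ('(' :: rest) p = pvB_find io tail rest (p + 1) := by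
        simp [pvB_find]
      rw [hA, hB, show io + (p : Int) + 1 = io + ((p + 1 : Nat) : Int) by push_cast; ring]
      exact ih (p + 1) hrest (cnt + 1) io
        (by rw [htake]; simp [List.count_append]; omega) (by omega) hio
    · by_cases hcl : c = ')'
      · subst hcl
        have hcond : ((tail.take p).count '(' = (tail.take (p + 1)).count ')') ↔ cnt - 1 = 0 := by
          rw [htake]; simp [List.count_append]; omega
        by_cases hz : cnt - 1 = 0
        · -- balance reached: A breaks with i_close = io + p, B's condition fires
          have hA : pvA_loop (')' :: rest) (io + p) io (-1) cnt = (io, io + p) := by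
            simp [pvA_loop, hz]
          have hB : pvB_find io tail (')' :: rest) p = (io, io + p) := by
            simp [pvB_find, hcond.mpr hz]
          rw [hA, hB]
        · -- still nested: A recurses with cnt - 1 ≥ 1, B's condition fails
          have hA : pvA_loop (')' :: rest) (io + p) io (-1) cnt
              = pvA_loop rest (io + p + 1) io (-1) (cnt - 1) := by
            simp [pvA_loop, hz, hio]
          have hcf : ¬ ((tail.take p).count '(' = (tail.take (p + 1)).count ')') :=
            fun h => hz (hcond.mp h)
          have hB : pvB_find io tail (')' :: rest) p = pvB_find io tail rest (p + 1) := by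
            simp [pvB_find, hcf]
          rw [hA, hB, show io + (p : Int) + 1 = io + ((p + 1 : Nat) : Int) by push_cast; ring]
          exact ih (p + 1) hrest (cnt - 1) io
            (by rw [htake]; simp [List.count_append]; omega) (by omega) hio
      · -- other character: both loops just advance
        have hA : pvA_loop (c :: rest) (io + p) io (-1) cnt
            = pvA_loop rest (io + p + 1) io (-1) cnt := by
          simp [pvA_loop, hop, hcl]
        have hB : pvB_find io tail (c :: rest) p = pvB_find io tail rest (p + 1) := by
          simp [pvB_find, hcl]
        rw [hA, hB, show io + (p : Int) + 1 = io + ((p + 1 : Nat) : Int) by push_cast; ring]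
        exact ih (p + 1) hrest cnt io
          (by rw [htake]; simp [List.count_append, hop, hcl]; exact hcnt) hc hio

-- The prefix phase: from the initial state (under Pre_), A equals "find first '(' then B's search".
theorem pvA_prefix (l : List Char) : ∀ (i : Int), 0 ≤ i →
    (match l.findIdx? (· == ')') with
      | none => True
      | some j => match l.findIdx? (· == '(') with
        | none => False
        | some k => k < j) →
    pvA_loop l i (-1) (-1) 0 =
      (match l.findIdx? (· == '(') with
        | none => (-1, -1)
        | some k => pvB_find (i + k) (l.drop k) (l.drop k) 0) := by
  induction l with
  | nil => intro i _ _; rfl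
  | cons c rest ih =>
    intro i hi hpre
    by_cases hop : c = '('
    · -- first '(' found at this position: hand over to pvPost with tail = '(' :: rest, p = 1
      subst hop
      have hA : pvA_loop ('(' :: rest) i (-1) (-1) 0 = pvA_loop rest (i + 1) i (-1) 1 := by
        simp [pvA_loop]
      have hB : pvB_find i ('(' :: rest) ('(' :: rest) 0
          = pvB_find i ('(' :: rest) rest 1 := by
        simp [pvB_find]
      rw [hA]
      have hpost := pvPost ('(' :: rest) rest 1 (by simp) 1 i (by simp) le_rfl (by omega)
      simp only [List.findIdx?_cons, beq_self_eq_true, if_true, List.drop_zero]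
      rw [show i + ((0 : Nat) : Int) = i by simp, hB]
      simpa using hpost
    · have hbeq1 : (c == '(') = false := by simpa using hop
      by_cases hcl : c = ')'
      · -- stray ')' : excluded by the precondition
        exfalso
        subst hcl
        rcases h2 : rest.findIdx? (· == '(') with _ | k <;>
          simp [List.findIdx?_cons, h2] at hpre
      · -- ordinary character: shift by one
        have hbeq2 : (c == ')') = false := by simpa using hcl
        have hpre' : (match rest.findIdx? (· == ')') with
            | none => True
            | some j => match rest.findIdx? (· == '(') with
              | none => False
              | some k => k < j) := by
          rcases h1 : rest.findIdx? (· == ')') with _ | j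
          · trivial
          · rcases h2 : rest.findIdx? (· == '(') with _ | k
            · exfalso
              simp [List.findIdx?_cons, hbeq1, hbeq2, h1, h2] at hpre
            · simp only [List.findIdx?_cons, hbeq1, hbeq2, Bool.false_eq_true, if_false,
                h1, h2, Option.map_some] at hpre ⊢
              omega
        have hA : pvA_loop (c :: rest) i (-1) (-1) 0 = pvA_loop rest (i + 1) (-1) (-1) 0 := by
          simp only [pvA_loop, if_neg hop, if_neg hcl]
        rw [hA, ih (i + 1) (by omega) hpre']
        rcases h2 : rest.findIdx? (· == '(') with _ | k
        · simp [List.findIdx?_cons, hbeq1, h2]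
        · simp only [List.findIdx?_cons, hbeq1, h2, Bool.false_eq_true, if_false,
            Option.map_some, List.drop_succ_cons]
          congr 1
          push_cast; ring

-- A singleton [c] prefixes l.drop i exactly when l[i]? = some c.
theorem pvSingle_prefix_iff (l : List Char) (c : Char) (i : Nat) :
    [c] <+: l.drop i ↔ l[i]? = some c := by
  constructor
  · rintro ⟨t, ht⟩
    have h0 := congrArg (·[0]?) ht
    simpa [List.getElem?_drop] using h0.symm
  · intro h
    have hlt : i < l.length := by
      by_contra hge
      rw [List.getElem?_eq_none (by omega)] at h
      simp at h
    refine ⟨l.drop (i + 1), ?_⟩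
    have hd : l.drop i = l[i] :: l.drop (i + 1) := List.drop_eq_getElem_cons hlt
    rw [hd]
    rw [List.getElem?_eq_getElem hlt, Option.some_inj] at h
    rw [h]
    rfl

-- Chars.find of a single character is List.findIdx? (as a Python -1-style index).
theorem pvFind_single (l : List Char) (c : Char) :
    PySem.Chars.find l [c] =
      (match l.findIdx? (· == c) with | none => (-1 : Int) | some j => (j : Int)) := by
  rcases h : l.findIdx? (· == c) with _ | j
  · rw [PySem.Chars.find_eq_neg_one_iff]
    intro hinf
    have hc : c ∈ l := by
      rcases hinf with ⟨s, t, hst⟩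
      subst hst; simp
    have := (List.findIdx?_eq_none_iff.mp h) c hc
    simp at this
  · obtain ⟨hlt, hget, hbefore⟩ := List.findIdx?_eq_some_iff_getElem.mp h
    have hgj : l[j] = c := by simpa using hget
    have hinf : [c] <:+: l := by
      refine ⟨l.take j, l.drop (j + 1), ?_⟩
      have hd : l.drop j = l[j] :: l.drop (j + 1) := List.drop_eq_getElem_cons hlt
      calc l.take j ++ [c] ++ l.drop (j + 1) = l.take j ++ (l[j] :: l.drop (j + 1)) := by
            rw [hgj]; simp
        _ = l.take j ++ l.drop j := by rw [hd]
        _ = l := List.take_append_drop j l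
    have hnonneg : 0 ≤ PySem.Chars.find l [c] := (PySem.Chars.find_nonneg_iff l [c]).mpr hinf
    obtain ⟨hpre, hmin⟩ := PySem.Chars.find_spec hnonneg
    set f := (PySem.Chars.find l [c]).toNat with hf
    have hgetf : l[f]? = some c := (pvSingle_prefix_iff l c f).mp hpre
    have hjf : ¬ j < f := by
      intro hlt'
      refine hmin j hlt' ?_
      rw [pvSingle_prefix_iff]
      rw [List.getElem?_eq_getElem hlt, hgj]
    have hfj : ¬ f < j := by
      intro hlt'
      have hflt : f < l.length := by omega
      have := hbefore f hlt'
      rw [List.getElem?_eq_getElem hflt, Option.some_inj] at hgetf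
      simp [hgetf] at this
    have hfeq : f = j := by omega
    show PySem.Chars.find l [c] = (j : Int)
    omega

-- ===== VERDICT (by name: the statement is the Claim_ definition above) =====
theorem parse_outer_paranthesis_spec : Claim_equal_parse_outer_paranthesis := by
  intro expr _ hpre
  unfold Spec_parse_outer_paranthesis parse_outer_paranthesis parse_outer_paranthesis_alt
  unfold Pre_parse_outer_paranthesis pvPreB at hpre
  have hpre' : (match expr.toList.findIdx? (· == ')') with
      | none => True
      | some j => match expr.toList.findIdx? (· == '(') with
        | none => False
        | some k => k < j) := by
    rcases h1 : expr.toList.findIdx? (· == ')') with _ | j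
    · trivial
    · rcases h2 : expr.toList.findIdx? (· == '(') with _ | k
      · simp [h1, h2] at hpre
      · simp only [h1, h2] at hpre ⊢
        exact of_decide_eq_true hpre
  rw [pvA_prefix expr.toList 0 le_rfl hpre']
  have hfind := pvFind_single expr.toList '('
  rcases h : expr.toList.findIdx? (· == '(') with _ | k
  · rw [h] at hfind
    simp only [] at hfind
    simp only [PySem.Str.find_eq, show ("(" : String).toList = ['('] from rfl]
    simp [hfind]
  · rw [h] at hfind
    simp only [] at hfind
    have h0 : (0 : Int) ≤ (k : Int) := Int.natCast_nonneg k
    have hne : ((k : Int)) ≠ -1 := by omega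
    simp only [PySem.Str.find_eq, show ("(" : String).toList = ['('] from rfl]
    rw [hfind]
    simp [hne]
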